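-- pv_equiv track=rewrite | github.com/GitMonsters/octotetrahedral-agi | re_arc_bench_solves/77d40a18.py | transform
-- ===== SOURCE A (Python) =====
-- from collections import Counter
--
-- def transform(grid):
--     grid = [list(row) for row in grid]
--     rows = len(grid)
--     cols = len(grid[0])
--
--     # Find background (most common) and foreground colors
--     color_counts = Counter(c for row in grid for c in row)
--     background = color_counts.most_common(1)[0][0]
--     foreground = None
--     for color, _ in color_counts.most_common():
--         if color != background:
--             foreground = color
--             break
--
--     if foreground is None:
--         return grid
--
--     # Find all positions that are part of a 2x2 square of foreground color
--     part_of_2x2 = set()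
--     for r in range(rows - 1):
--         for c in range(cols - 1):
--             if (grid[r][c] == foreground and
--                 grid[r+1][c] == foreground and
--                 grid[r][c+1] == foreground and
--                 grid[r+1][c+1] == foreground):
--                 part_of_2x2.add((r, c))
--                 part_of_2x2.add((r+1, c))
--                 part_of_2x2.add((r, c+1))
--                 part_of_2x2.add((r+1, c+1))
--
--     # Create output: 2x2 parts → gray(5), other foreground → magenta(6)
--     output = [row[:] for row in grid]
--     for r in range(rows):
--         for c in range(cols):
--             if grid[r][c] == foreground:
--                 output[r][c] = 5 if (r, c) in part_of_2x2 else 6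
--
--     return output
-- ===== SOURCE B (Python) =====
-- from collections import Counter
--
-- def transform(grid):
--     grid = [list(row) for row in grid]
--     rows = len(grid)
--     cols = len(grid[0])
--
--     # most_common() puts the background (most common color) first; the foreground
--     # is the next most common color, None if the grid has a single color
--     mc = Counter(c for row in grid for c in row).most_common()
--     foreground = mc[1][0] if len(mc) > 1 else None
--
--     if foreground is None:
--         return grid
--
--     def full(r, c):
--         # (r, c) is a valid top-left corner of an all-foreground 2x2 block
--         return (0 <= r and r + 1 < rows and 0 <= c and c + 1 < cols
--                 and grid[r][c] == foreground and grid[r + 1][c] == foreground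
--                 and grid[r][c + 1] == foreground and grid[r + 1][c + 1] == foreground)
--
--     return [[(5 if any(full(rr, cc) for rr in (r - 1, r) for cc in (c - 1, c)) else 6)
--              if grid[r][c] == foreground else grid[r][c]
--              for c in range(cols)]
--             for r in range(rows)]
-- ===== Notes on version B (the rewrite author's own statement) =====
-- stated objective: simpler
-- what changed: A builds an intermediate set of all positions belonging to an all-foreground 2x2 block via a separate corner scan and then looks each cell up in it; B drops that set entirely and decides each cell directly by testing its four candidate 2x2 top-left corners, producing the output in a single comprehension (foreground detection is also simplified to taking most_common()[1] instead of a scan-with-break).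
-- outside the precondition, e.g. on transform([[1, 2], [1, 2, 3]]): A returns [[1, 6], [1, 6, 3]], B returns [[1, 6], [1, 6]]
import Mathlib
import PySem

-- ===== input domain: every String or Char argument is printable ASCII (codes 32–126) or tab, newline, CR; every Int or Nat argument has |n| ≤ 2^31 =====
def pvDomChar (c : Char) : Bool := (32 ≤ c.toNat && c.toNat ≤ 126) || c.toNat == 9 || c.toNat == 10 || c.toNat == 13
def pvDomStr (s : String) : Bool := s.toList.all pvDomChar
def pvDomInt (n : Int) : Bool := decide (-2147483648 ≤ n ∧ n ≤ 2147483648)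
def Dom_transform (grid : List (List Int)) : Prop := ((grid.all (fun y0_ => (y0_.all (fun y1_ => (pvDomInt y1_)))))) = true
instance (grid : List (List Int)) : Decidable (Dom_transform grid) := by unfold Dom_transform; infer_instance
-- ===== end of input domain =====

-- B replaces A's set of 2x2-member positions (built by a corner scan) with a direct per-cell
-- test of the four candidate 2x2 corners; equivalence of the return values is proved on
-- nonempty rectangular grids.

-- shared cell accessor: grid[r][c]
def pvCell (grid : List (List Int)) (r c : Int) : Int :=
  PySem.List.pyGetD (PySem.List.pyGetD grid r []) c 0

-- Counter(...).most_common(): items sorted by count descending, stable (first-encounter order)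
def pvMostCommon (grid : List (List Int)) : List (Int × Int) :=
  PySem.List.sorted (PySem.Dict.counter (grid.flatMap (fun row => row))).items (fun kv => kv.2) true

-- ===== PORT A =====
-- A's foreground loop: first color in most_common order differing from background (break)
def pvFindFg (background : Int) : List (Int × Int) → Option Int
  | [] => none
  | (color, _) :: rest => if color ≠ background then some color else pvFindFg background rest

-- A's 2x2 corner condition at top-left (r, c)
def pvFull (grid : List (List Int)) (fg r c : Int) : Bool :=
  pvCell grid r c == fg && pvCell grid (r+1) c == fg &&
  pvCell grid r (c+1) == fg && pvCell grid (r+1) (c+1) == fg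

-- the part_of_2x2 set, filled by the corner scan over ranges rows-1 x cols-1
def pvPartSet (grid : List (List Int)) (fg rows cols : Int) : PySem.Set (Int × Int) :=
  (PySem.List.pyRange 0 (rows - 1) 1).foldl (fun s r =>
    (PySem.List.pyRange 0 (cols - 1) 1).foldl (fun s c =>
      if pvFull grid fg r c then
        PySem.Set.add (PySem.Set.add (PySem.Set.add (PySem.Set.add s (r, c)) (r+1, c)) (r, c+1)) (r+1, c+1)
      else s) s) PySem.Set.empty

-- the output loop: output = [row[:] for row in grid] (a copy, identity here), then in-place writes
def pvPaintA (grid : List (List Int)) (fg rows cols : Int) (part : PySem.Set (Int × Int)) :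
    List (List Int) :=
  (PySem.List.pyRange 0 rows 1).foldl (fun out r =>
    (PySem.List.pyRange 0 cols 1).foldl (fun out c =>
      if pvCell grid r c == fg then
        PySem.List.pySetD out r
          (PySem.List.pySetD (PySem.List.pyGetD out r []) c (if (r, c) ∈ part then 5 else 6))
      else out) out) grid

def transform (grid : List (List Int)) : List (List Int) :=
  -- grid = [list(row) for row in grid] : a copy, identity on immutable lists;
  -- rows = len(grid), cols = len(grid[0]), mc = most_common() (most_common(1)[0] is its head)
  match pvFindFg (PySem.List.pyGetD (pvMostCommon grid) 0 (0, 0)).1 (pvMostCommon grid) with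
  | none => grid
  | some fg =>
    pvPaintA grid fg (PySem.List.len grid) (PySem.List.len (PySem.List.pyGetD grid 0 []))
      (pvPartSet grid fg (PySem.List.len grid) (PySem.List.len (PySem.List.pyGetD grid 0 [])))

-- ===== PORT B =====
-- B's full(r, c): bounds check plus the four-cell test
def pvFullB (grid : List (List Int)) (rows cols fg r c : Int) : Bool :=
  decide (0 ≤ r) && decide (r + 1 < rows) && decide (0 ≤ c) && decide (c + 1 < cols) &&
  (pvCell grid r c == fg) && (pvCell grid (r+1) c == fg) &&
  (pvCell grid r (c+1) == fg) && (pvCell grid (r+1) (c+1) == fg)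

-- B's output comprehension: per cell, test the four candidate 2x2 corners
def pvPaintB (grid : List (List Int)) (fg rows cols : Int) : List (List Int) :=
  (PySem.List.pyRange 0 rows 1).map (fun r =>
    (PySem.List.pyRange 0 cols 1).map (fun c =>
      if pvCell grid r c == fg then
        (if pvFullB grid rows cols fg (r-1) (c-1) || pvFullB grid rows cols fg (r-1) c ||
            pvFullB grid rows cols fg r (c-1) || pvFullB grid rows cols fg r c then 5 else 6)
      else pvCell grid r c))

def transform_alt (grid : List (List Int)) : List (List Int) :=
  -- mc = most_common(); foreground = mc[1][0] if len(mc) > 1 else None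
  match (if 1 < (pvMostCommon grid).length
         then some (PySem.List.pyGetD (pvMostCommon grid) 1 (0, 0)).1 else none) with
  | none => grid
  | some fg =>
    pvPaintB grid fg (PySem.List.len grid) (PySem.List.len (PySem.List.pyGetD grid 0 []))

-- ===== PRECONDITION & SPEC =====
-- Pre_ restricts to the task's natural domain: nonempty rectangular grids with at least one
-- column (the function is a grid transform; a ragged list of lists is malformed input for it).
-- A raises IndexError on the empty grid, on zero-column grids and on ragged grids with a later
-- row shorter than the first; ragged grids whose later rows are longer than the first (where A
-- still returns, recoloring only the first len(grid[0]) columns) are likewise excluded as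
-- malformed rather than matched.
def Pre_transform (grid : List (List Int)) : Prop :=
  grid ≠ [] ∧ 0 < (grid.headI).length ∧ ∀ row ∈ grid, row.length = (grid.headI).length
instance (grid : List (List Int)) : Decidable (Pre_transform grid) := by
  unfold Pre_transform; infer_instance
def pvWitness_transform : List (List Int) := [[1, 1], [1, 2]]
def Spec_transform (grid : List (List Int)) (out : List (List Int)) : Prop := out = transform_alt grid
instance (grid : List (List Int)) (out : List (List Int)) : Decidable (Spec_transform grid out) := by
  unfold Spec_transform; infer_instance

-- ===== CLAIM (what is proved, stated in full; the proofs are below) =====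
def Claim_equal_transform : Prop := ∀ (grid : List (List Int)), Dom_transform grid → Pre_transform grid → Spec_transform grid (transform grid)

-- ===== LEMMAS AND PROOFS =====

-- membership through a foldl of conditional Set.adds
theorem pv_mem_foldl_set (l : List Int) (f : PySem.Set (Int × Int) → Int → PySem.Set (Int × Int))
    (R : Int → (Int × Int) → Prop)
    (hf : ∀ s x p, p ∈ f s x ↔ p ∈ s ∨ R x p) (s : PySem.Set (Int × Int)) (p : Int × Int) :
    p ∈ l.foldl f s ↔ p ∈ s ∨ ∃ x ∈ l, R x p := by
  induction l generalizing s with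
  | nil => simp
  | cons x l ih =>
    simp only [List.foldl_cons, ih, hf, List.mem_cons]
    constructor
    · rintro ((h | h) | ⟨y, hy, hr⟩)
      · exact Or.inl h
      · exact Or.inr ⟨x, Or.inl rfl, h⟩
      · exact Or.inr ⟨y, Or.inr hy, hr⟩
    · rintro (h | ⟨y, (rfl | hy), hr⟩)
      · exact Or.inl (Or.inl h)
      · exact Or.inl (Or.inr hr)
      · exact Or.inr ⟨y, hy, hr⟩

-- generic "set distinct increasing indices" loop
theorem pv_map_range_getD {α : Type} (xs : List α) (d : α) :
    (List.range xs.length).map (fun j => xs.getD j d) = xs := by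
  apply List.ext_getElem
  · simp
  · intro j h1 h2
    simp [List.getD_eq_getElem?_getD, List.getElem?_eq_getElem h2]

theorem pv_setloop {α : Type} (h : Int → α → α) (d : α) (k : Nat) (xs : List α) (hk : k ≤ xs.length) :
    (PySem.List.pyRange 0 (k : Int) 1).foldl
        (fun o x => PySem.List.pySetD o x (h x (PySem.List.pyGetD o x d))) xs
      = (List.range xs.length).map (fun j => if j < k then h (j : Int) (xs.getD j d) else xs.getD j d) := by
  induction k with
  | zero =>
    rw [PySem.List.pyRange_one_eq_nil (by omega)]
    simp only [List.foldl_nil, Nat.not_lt_zero, if_false]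
    exact (pv_map_range_getD xs d).symm
  | succ k ih =>
    have hk' : k ≤ xs.length := by omega
    have hcast : ((k + 1 : Nat) : Int) = (k : Int) + 1 := by push_cast; ring
    rw [hcast, PySem.List.pyRange_one_succ_right (by positivity), List.foldl_append]
    rw [ih hk']
    set L := (List.range xs.length).map
        (fun j => if j < k then h (j : Int) (xs.getD j d) else xs.getD j d) with hL
    have hLlen : L.length = xs.length := by simp [hL]
    have hkxs : k < xs.length := by omega
    have hget : PySem.List.pyGetD L (k : Int) d = xs.getD k d := by
      rw [PySem.List.pyGetD_natCast, hL]
      simp [List.getD_eq_getElem?_getD, hkxs]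
    simp only [List.foldl_cons, List.foldl_nil, hget, PySem.List.pySetD_natCast]
    apply List.ext_getElem
    · simp [hL]
    · intro j h1 h2
      rw [List.getElem_set]
      simp only [List.length_map, List.length_range] at h2
      by_cases hjk : k = j
      · subst hjk
        simp [hkxs, List.getElem_map, List.getD_eq_getElem?_getD]
      · have hj2 : j < xs.length := by simpa using h2
        simp only [hL, List.getElem_map, List.getElem_range, if_neg hjk]
        by_cases hlt : j < k
        · rw [if_pos hlt, if_pos (by omega)]
        · rw [if_neg hlt, if_neg (by omega)]

-- writing back the value just read is a no-op (nonnegative index)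
theorem pv_setD_getD_self {α : Type} (xs : List α) (i : Int) (d : α) (hi : 0 ≤ i) :
    PySem.List.pySetD xs i (PySem.List.pyGetD xs i d) = xs := by
  lift i to ℕ using hi
  rw [PySem.List.pySetD_natCast, PySem.List.pyGetD_natCast]
  by_cases h : i < xs.length
  · rw [List.getD_eq_getElem?_getD, List.getElem?_eq_getElem h]
    simp
  · exact List.set_eq_of_length_le (by omega)

-- a conditional write is an unconditional write of a conditional value (nonnegative index)
theorem pv_condset {α : Type} (row : List α) (c : Int) (d : α) (b : Bool) (w : α) (hc : 0 ≤ c) :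
    (if b then PySem.List.pySetD row c w else row)
      = PySem.List.pySetD row c (if b then w else PySem.List.pyGetD row c d) := by
  cases b with
  | true => simp
  | false => simp [pv_setD_getD_self row c d hc]

-- the inner column loop only rewrites row r of the matrix
theorem pv_inner_fold (l : List Int) (P : Int → Bool) (v : Int → Int) (r : Int)
    (hr : 0 ≤ r) (hl : ∀ c ∈ l, (0:Int) ≤ c) (out : List (List Int)) :
    l.foldl (fun o c => if P c then
        PySem.List.pySetD o r (PySem.List.pySetD (PySem.List.pyGetD o r []) c (v c)) else o) out
      = PySem.List.pySetD out r
          (l.foldl (fun row c => if P c then PySem.List.pySetD row c (v c) else row)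
            (PySem.List.pyGetD out r [])) := by
  lift r to ℕ using hr
  induction l generalizing out with
  | nil =>
    simp only [List.foldl_nil]
    exact (pv_setD_getD_self out _ [] (by positivity)).symm
  | cons c l ih =>
    have hl' : ∀ c ∈ l, (0:Int) ≤ c := fun x hx => hl x (List.mem_cons_of_mem _ hx)
    simp only [List.foldl_cons]
    cases hP : P c with
    | false => simp only [if_neg (by simp : ¬(false = true))]; exact ih hl' out
    | true =>
      simp only [if_true]
      rw [ih hl']
      by_cases hrl : r < out.length
      · rw [PySem.List.pySetD_natCast, PySem.List.pySetD_natCast, PySem.List.pySetD_natCast,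
            PySem.List.pyGetD_natCast, PySem.List.pyGetD_natCast, List.set_set]
        congr 1
        rw [List.getD_eq_getElem?_getD, List.getElem?_set_self (by omega)]
        simp [List.getD_eq_getElem?_getD]
      · have h1 : PySem.List.pySetD out (r : Int)
            (PySem.List.pySetD (PySem.List.pyGetD out (r : Int) []) c (v c)) = out := by
          rw [PySem.List.pySetD_natCast]
          exact List.set_eq_of_length_le (by omega)
        rw [h1, PySem.List.pySetD_natCast, PySem.List.pySetD_natCast,
            List.set_eq_of_length_le (by omega), List.set_eq_of_length_le (by omega)]

-- pvFullB unfolded to its Prop form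
theorem pv_fullB_iff (grid : List (List Int)) (rows cols fg r c : Int) :
    pvFullB grid rows cols fg r c = true
      ↔ 0 ≤ r ∧ r + 1 < rows ∧ 0 ≤ c ∧ c + 1 < cols ∧ pvFull grid fg r c = true := by
  simp only [pvFullB, pvFull, Bool.and_eq_true, decide_eq_true_eq]
  tauto

-- A's break-loop finds exactly the second entry of most_common (keys are distinct)
theorem pv_fg (mc : List (Int × Int)) (hnd : (mc.map Prod.fst).Nodup) (hne : mc ≠ []) :
    pvFindFg (PySem.List.pyGetD mc 0 (0, 0)).1 mc
      = if 1 < mc.length then some (PySem.List.pyGetD mc 1 (0, 0)).1 else none := by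
  match mc, hne with
  | ((c0, v0) :: rest), _ =>
    rw [PySem.List.pyGetD_zero_cons]
    show pvFindFg c0 ((c0, v0) :: rest) = _
    rw [pvFindFg, if_neg (by simp)]
    match rest with
    | [] => simp [pvFindFg]
    | ((c1, v1) :: t) =>
      have hne1 : c1 ≠ c0 := by
        simp only [List.map_cons, List.nodup_cons, List.mem_cons] at hnd
        exact fun h => hnd.1 (Or.inl h.symm)
      rw [pvFindFg, if_pos hne1, if_pos (by simp)]
      simp [PySem.List.pyGetD, PySem.List.pyGet?, PySem.List.pyIdx?]

theorem pv_mc_nodup (grid : List (List Int)) : ((pvMostCommon grid).map Prod.fst).Nodup := by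
  unfold pvMostCommon
  have hperm := (PySem.List.sorted_perm
    ((PySem.Dict.counter (grid.flatMap (fun row => row))).items)
    (fun kv => kv.2) true).map Prod.fst
  rw [hperm.nodup_iff]
  exact PySem.Dict.nodup_keys_counter (grid.flatMap (fun row => row))

theorem pv_mc_ne_nil (g : List Int) (gs : List (List Int)) (hm : 0 < g.length) :
    pvMostCommon (g :: gs) ≠ [] := by
  unfold pvMostCommon
  rw [Ne, PySem.List.sorted_eq_nil_iff]
  intro h
  have hx : g.headI ∈ (g :: gs).flatMap (fun row => row) := by
    cases g with
    | nil => simp at hm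
    | cons a t => simp
  rw [PySem.Dict.items_counter, List.map_eq_nil_iff] at h
  have : g.headI ∈ PySem.Set.ofList ((g :: gs).flatMap (fun row => row)) :=
    (PySem.Set.mem_ofList _ _).mpr hx
  rw [h] at this
  exact absurd this (List.not_mem_nil)

theorem pv_getD_mem {α : Type} (l : List α) (j : Nat) (d : α) (h : j < l.length) :
    l.getD j d ∈ l := by
  rw [List.getD_eq_getElem?_getD, List.getElem?_eq_getElem h]
  exact List.getElem_mem h

-- membership in A's part_of_2x2 set
theorem pv_mem_part (grid : List (List Int)) (fg : Int) (rows cols : Int) (p : Int × Int) :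
    p ∈ pvPartSet grid fg rows cols
      ↔ ∃ r c : Int, 0 ≤ r ∧ r < rows - 1 ∧ 0 ≤ c ∧ c < cols - 1 ∧ pvFull grid fg r c = true ∧
          (p = (r, c) ∨ p = (r+1, c) ∨ p = (r, c+1) ∨ p = (r+1, c+1)) := by
  unfold pvPartSet
  rw [pv_mem_foldl_set _ _
    (fun r q => ∃ c, 0 ≤ c ∧ c < cols - 1 ∧ pvFull grid fg r c = true ∧
        (q = (r, c) ∨ q = (r+1, c) ∨ q = (r, c+1) ∨ q = (r+1, c+1)))
    (fun s r q => by
      rw [pv_mem_foldl_set _ _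
        (fun c q => pvFull grid fg r c = true ∧
            (q = (r, c) ∨ q = (r+1, c) ∨ q = (r, c+1) ∨ q = (r+1, c+1)))
        (fun s c q => by
          by_cases hF : pvFull grid fg r c = true
          · simp only [hF, if_true, true_and, PySem.Set.mem_add]
            tauto
          · simp only [if_neg hF]
            tauto)]
      constructor
      · rintro (h | ⟨c, hc, hF, hq⟩)
        · exact Or.inl h
        · exact Or.inr ⟨c, ((PySem.List.mem_pyRange_one).mp hc).1,
            ((PySem.List.mem_pyRange_one).mp hc).2, hF, hq⟩
      · rintro (h | ⟨c, h0, h1, hF, hq⟩)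
        · exact Or.inl h
        · exact Or.inr ⟨c, (PySem.List.mem_pyRange_one).mpr ⟨h0, h1⟩, hF, hq⟩)]
  constructor
  · rintro (h | ⟨r, hr, c, h0, h1, hF, hq⟩)
    · exact absurd h (List.not_mem_nil)
    · exact ⟨r, c, ((PySem.List.mem_pyRange_one).mp hr).1,
        ((PySem.List.mem_pyRange_one).mp hr).2, h0, h1, hF, hq⟩
  · rintro ⟨r, c, hr0, hr1, h0, h1, hF, hq⟩
    exact Or.inr ⟨r, (PySem.List.mem_pyRange_one).mpr ⟨hr0, hr1⟩, ⟨c, h0, h1, hF, hq⟩⟩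

-- B's four-candidate test agrees with membership in A's set
theorem pv_four_iff (grid : List (List Int)) (fg : Int) (n m j c : Nat)
    (hj : j < n) (hc : c < m) :
    ((pvFullB grid (n : Int) (m : Int) fg ((j:Int)-1) ((c:Int)-1) ||
      pvFullB grid (n : Int) (m : Int) fg ((j:Int)-1) (c:Int) ||
      pvFullB grid (n : Int) (m : Int) fg (j:Int) ((c:Int)-1) ||
      pvFullB grid (n : Int) (m : Int) fg (j:Int) (c:Int)) = true)
      ↔ (((j:Int), (c:Int)) ∈ pvPartSet grid fg (n : Int) (m : Int)) := by
  rw [pv_mem_part]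
  simp only [Bool.or_eq_true, pv_fullB_iff]
  constructor
  · rintro (((⟨h0, h1, h2, h3, hF⟩ | ⟨h0, h1, h2, h3, hF⟩) | ⟨h0, h1, h2, h3, hF⟩) | ⟨h0, h1, h2, h3, hF⟩)
    · exact ⟨(j:Int)-1, (c:Int)-1, h0, by omega, h2, by omega, hF, by
        right; right; right; simp only [Prod.mk.injEq]; omega⟩
    · exact ⟨(j:Int)-1, (c:Int), h0, by omega, h2, by omega, hF, by
        right; left; simp only [Prod.mk.injEq, and_true]; omega⟩
    · exact ⟨(j:Int), (c:Int)-1, h0, by omega, h2, by omega, hF, by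
        right; right; left; simp only [Prod.mk.injEq, true_and]; omega⟩
    · exact ⟨(j:Int), (c:Int), h0, by omega, h2, by omega, hF, by
        left; simp⟩
  · rintro ⟨r, c', hr0, hr1, hc0, hc1, hF, (hq | hq | hq | hq)⟩ <;>
      rw [Prod.ext_iff] at hq <;> simp only at hq <;> obtain ⟨hq1, hq2⟩ := hq
    · refine Or.inr ⟨by omega, by omega, by omega, by omega, ?_⟩
      rw [show (j:Int) = r from hq1, show (c:Int) = c' from hq2]; exact hF
    · refine Or.inl (Or.inl (Or.inr ⟨by omega, by omega, by omega, by omega, ?_⟩))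
      rw [show (j:Int)-1 = r by omega, show (c:Int) = c' from hq2]; exact hF
    · refine Or.inl (Or.inr ⟨by omega, by omega, by omega, by omega, ?_⟩)
      rw [show (j:Int) = r from hq1, show (c:Int)-1 = c' by omega]; exact hF
    · refine Or.inl (Or.inl (Or.inl ⟨by omega, by omega, by omega, by omega, ?_⟩))
      rw [show (j:Int)-1 = r by omega, show (c:Int)-1 = c' by omega]; exact hF

-- the output loop of A equals the comprehension of B (rectangular n x m grid)
theorem pv_paint_eq (grid : List (List Int)) (fg : Int) (n m : Nat)
    (hn : grid.length = n) (hrect : ∀ row ∈ grid, row.length = m) :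
    pvPaintA grid fg (n : Int) (m : Int) (pvPartSet grid fg (n : Int) (m : Int))
      = pvPaintB grid fg (n : Int) (m : Int) := by
  unfold pvPaintA pvPaintB
  rw [PySem.List.foldl_congr_mem _ _
    (fun out r => PySem.List.pySetD out r
      ((PySem.List.pyRange 0 (m : Int) 1).foldl (fun row c =>
        if pvCell grid r c == fg then
          PySem.List.pySetD row c
            (if (r, c) ∈ pvPartSet grid fg (n : Int) (m : Int) then 5 else 6)
        else row) (PySem.List.pyGetD out r []))) grid
    (fun acc r hr => pv_inner_fold _ _ _ r ((PySem.List.mem_pyRange_one).mp hr).1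
      (fun c hc => ((PySem.List.mem_pyRange_one).mp hc).1) acc)]
  rw [pv_setloop (fun r row =>
      (PySem.List.pyRange 0 (m : Int) 1).foldl (fun row c =>
        if pvCell grid r c == fg then
          PySem.List.pySetD row c
            (if (r, c) ∈ pvPartSet grid fg (n : Int) (m : Int) then 5 else 6)
        else row) row) [] n grid (le_of_eq hn.symm)]
  rw [PySem.List.pyRange_one 0 (n : Int)]
  simp only [Int.sub_zero, Int.toNat_natCast, List.map_map, hn]
  apply List.map_congr_left
  intro j hj
  rw [List.mem_range] at hj
  rw [if_pos hj]
  simp only [Function.comp_apply, Int.zero_add]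
  have hrowmem : grid.getD j [] ∈ grid := pv_getD_mem grid j [] (by omega)
  have hrow : (grid.getD j []).length = m := hrect _ hrowmem
  rw [PySem.List.foldl_congr_mem _ _
    (fun row c => PySem.List.pySetD row c
      (if pvCell grid (j : Int) c == fg then
        (if ((j : Int), c) ∈ pvPartSet grid fg (n : Int) (m : Int) then 5 else 6)
      else PySem.List.pyGetD row c 0)) _
    (fun acc c hc => pv_condset acc c 0 _ _ ((PySem.List.mem_pyRange_one).mp hc).1)]
  rw [pv_setloop (fun c cur =>
      if pvCell grid (j : Int) c == fg then
        (if ((j : Int), c) ∈ pvPartSet grid fg (n : Int) (m : Int) then 5 else 6)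
      else cur) 0 m (grid.getD j []) (le_of_eq hrow.symm)]
  rw [PySem.List.pyRange_one 0 (m : Int)]
  simp only [Int.sub_zero, Int.toNat_natCast, List.map_map, hrow]
  apply List.map_congr_left
  intro c hc
  rw [List.mem_range] at hc
  rw [if_pos hc]
  simp only [Function.comp_apply, Int.zero_add]
  have hcell : pvCell grid (j : Int) (c : Int) = (grid.getD j []).getD c 0 := by
    simp [pvCell, PySem.List.pyGetD_natCast]
  rw [if_congr (Iff.rfl) rfl rfl]
  by_cases hP : (pvCell grid (j : Int) (c : Int) == fg) = true
  · rw [if_pos hP, if_pos hP, if_congr (pv_four_iff grid fg n m j c hj hc) rfl rfl]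
  · rw [if_neg hP, if_neg hP, hcell]

-- ===== VERDICT (by name: the statement is the Claim_ definition above) =====
theorem transform_spec : Claim_equal_transform := by
  intro grid _hdom hpre
  obtain ⟨hne, hm0, hrect⟩ := hpre
  obtain ⟨g, gs, rfl⟩ : ∃ g gs, grid = g :: gs := by
    cases grid with
    | nil => exact absurd rfl hne
    | cons a l => exact ⟨a, l, rfl⟩
  unfold Spec_transform transform transform_alt
  rw [pv_fg _ (pv_mc_nodup _) (pv_mc_ne_nil g gs hm0)]
  by_cases hlen : 1 < (pvMostCommon (g :: gs)).length
  · rw [if_pos hlen]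
    show pvPaintA _ _ _ _ _ = pvPaintB _ _ _ _
    have e1 : PySem.List.len (g :: gs) = (((g :: gs).length : Nat) : Int) :=
      PySem.List.len_eq _
    have e2 : PySem.List.len (PySem.List.pyGetD (g :: gs) 0 []) = ((g.length : Nat) : Int) := by
      rw [PySem.List.pyGetD_zero_cons]; exact PySem.List.len_eq _
    rw [e1, e2]
    exact pv_paint_eq (g :: gs) _ (g :: gs).length g.length rfl (by simpa using hrect)
  · rw [if_neg hlen]
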